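-- pv_equiv track=rewrite | github.com/trevor-commits/biz-SOPs | scripts/build_service_catalog.py | parse_body_blocks
-- ===== SOURCE A (Python) =====
-- def parse_body_blocks(body: str) -> dict[str, str]:
--     blocks: dict[str, str] = {}
--     lines = body.splitlines()
--     index = 0
--     while index < len(lines):
--         line = lines[index]
--         if not (line.startswith("## ") or line.startswith("> [!")):
--             index += 1
--             continue
--         block_start = line
--         next_index = index + 1
--         while next_index < len(lines) and not (
--             lines[next_index].startswith("## ") or lines[next_index].startswith("> [!")
--         ):
--             next_index += 1
--         block_text = "\n".join(lines[index:next_index]).rstrip()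
--         blocks[block_start] = block_text
--         index = next_index
--     return blocks
-- ===== SOURCE B (Python) =====
-- def parse_body_blocks(body: str) -> dict[str, str]:
--     blocks: dict[str, str] = {}
--     current = None
--     buffer: list[str] = []
--     for line in body.splitlines():
--         if line.startswith("## ") or line.startswith("> [!"):
--             if current is not None:
--                 blocks[current] = "\n".join(buffer).rstrip()
--             current = line
--             buffer = [line]
--         elif current is not None:
--             buffer.append(line)
--     if current is not None:
--         blocks[current] = "\n".join(buffer).rstrip()
--     return blocks
-- ===== Notes on version B (the rewrite author's own statement) =====
-- stated objective: simpler
-- what changed: Replaces the index-based outer while loop with a nested look-ahead scan and slicing by a single linear pass over the lines that maintains the current header and a buffer, flushing a block whenever the next header (or the end) is reached.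
import Mathlib
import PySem

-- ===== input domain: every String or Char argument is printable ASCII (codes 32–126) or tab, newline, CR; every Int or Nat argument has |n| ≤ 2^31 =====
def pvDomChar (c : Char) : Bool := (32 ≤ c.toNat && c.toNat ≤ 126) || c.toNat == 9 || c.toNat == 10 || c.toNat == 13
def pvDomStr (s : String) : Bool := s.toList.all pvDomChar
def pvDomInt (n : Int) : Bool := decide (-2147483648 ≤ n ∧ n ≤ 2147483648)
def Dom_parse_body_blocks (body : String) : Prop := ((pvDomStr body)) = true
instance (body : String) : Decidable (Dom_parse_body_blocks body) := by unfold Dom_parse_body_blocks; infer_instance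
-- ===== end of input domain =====

-- B replaces A's index-based while loop with nested look-ahead scan by one linear pass
-- keeping a current header and a buffer (objective: simpler decomposition; same result).

-- ===== PORT A =====
def pvIsHdr (l : String) : Bool :=
  PySem.Str.startswith l "## " || PySem.Str.startswith l "> [!"

-- inner while: advance next_index past non-header lines
def pvScanNext (lines : List String) (j : Nat) : Nat :=
  if h : j < lines.length ∧ ¬ pvIsHdr (lines.getD j "") then pvScanNext lines (j + 1) else j
termination_by lines.length - j
decreasing_by omega

-- used by pvLoopA's decreasing_by
theorem pvScanNext_ge (lines : List String) (j : Nat) : j ≤ pvScanNext lines j := by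
  fun_induction pvScanNext lines j with
  | case1 j h ih => omega
  | case2 j h => omega

def pvLoopA (lines : List String) (blocks : PySem.Dict String String) (i : Nat) :
    PySem.Dict String String :=
  if h : i < lines.length then
    let line := lines.getD i ""
    if ¬ pvIsHdr line then pvLoopA lines blocks (i + 1)
    else
      let n := pvScanNext lines (i + 1)
      let bt := PySem.Str.rstrip (PySem.Str.join "\n"
        (PySem.List.slice lines (some (i : Int)) (some (n : Int))))
      pvLoopA lines (blocks.insert line bt) n
  else blocks
termination_by lines.length - i
decreasing_by
  · omega
  · have := pvScanNext_ge lines (i + 1); omega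

def parse_body_blocks (body : String) : List (String × String) :=
  (pvLoopA (PySem.Str.splitlines body) PySem.Dict.empty 0).items

-- ===== PORT B =====
-- 'if current is not None: blocks[current] = "\n".join(buffer).rstrip()'
def pvFlush (st : PySem.Dict String String × Option String × List String) :
    PySem.Dict String String :=
  match st.2.1 with
  | some h => st.1.insert h (PySem.Str.rstrip (PySem.Str.join "\n" st.2.2))
  | none => st.1

def pvStepB (st : PySem.Dict String String × Option String × List String) (line : String) :
    PySem.Dict String String × Option String × List String :=
  if pvIsHdr line then (pvFlush st, some line, [line])
  else
    match st.2.1 with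
    | some _ => (st.1, st.2.1, st.2.2 ++ [line])
    | none => st

def parse_body_blocks_alt (body : String) : List (String × String) :=
  (pvFlush ((PySem.Str.splitlines body).foldl pvStepB (PySem.Dict.empty, none, []))).items

-- ===== PRECONDITION & SPEC =====
def Spec_parse_body_blocks (body : String) (out : List (String × String)) : Prop :=
  out = parse_body_blocks_alt body
instance (body : String) (out : List (String × String)) : Decidable (Spec_parse_body_blocks body out) := by
  unfold Spec_parse_body_blocks; infer_instance

-- ===== CLAIM (what is proved, stated in full; the proofs are below) =====
def Claim_equal_parse_body_blocks : Prop :=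
  ∀ (body : String), Dom_parse_body_blocks body → Spec_parse_body_blocks body (parse_body_blocks body)

-- ===== LEMMAS AND PROOFS =====

-- common recursive reference form over the list of lines
def pvListA : List String → PySem.Dict String String → PySem.Dict String String
  | [], b => b
  | l :: ls, b =>
    if pvIsHdr l then
      pvListA (ls.dropWhile (fun x => !pvIsHdr x))
        (b.insert l (PySem.Str.rstrip (PySem.Str.join "\n"
          (l :: ls.takeWhile (fun x => !pvIsHdr x)))))
    else pvListA ls b
termination_by ls => ls.length
decreasing_by
  · have := List.length_dropWhile_le (fun x => !pvIsHdr x) ls; simpa using Nat.lt_succ_of_le this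
  · simp

theorem pv_take_takeWhile {α : Type} (p : α → Bool) (l : List α) :
    l.take (l.takeWhile p).length = l.takeWhile p := by
  induction l with
  | nil => simp
  | cons x xs ih => by_cases h : p x <;> simp [h, ih]

theorem pv_drop_takeWhile {α : Type} (p : α → Bool) (l : List α) :
    l.drop (l.takeWhile p).length = l.dropWhile p := by
  induction l with
  | nil => simp
  | cons x xs ih => by_cases h : p x <;> simp [h, ih]

theorem pvScanNext_eq (lines : List String) (j : Nat) :
    pvScanNext lines j = j + ((lines.drop j).takeWhile (fun x => !pvIsHdr x)).length := by
  fun_induction pvScanNext lines j with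
  | case1 j h ih =>
    obtain ⟨hj, hhdr⟩ := h
    have hh : pvIsHdr lines[j] = false := by
      simp only [List.getD_eq_getElem?_getD, List.getElem?_eq_getElem hj, Option.getD_some] at hhdr
      simpa using hhdr
    rw [ih, List.drop_eq_getElem_cons hj, List.takeWhile_cons, hh]
    simp; omega
  | case2 j h =>
    by_cases hj : j < lines.length
    · have hh : pvIsHdr lines[j] = true := by
        by_contra hc
        exact h ⟨hj, by simp only [List.getD_eq_getElem?_getD, List.getElem?_eq_getElem hj, Option.getD_some]; simpa using hc⟩
      rw [List.drop_eq_getElem_cons hj, List.takeWhile_cons, hh]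
      simp
    · rw [List.drop_eq_nil_of_le (by omega)]; simp
theorem pvLoopA_eq (lines : List String) (blocks : PySem.Dict String String) (i : Nat) :
    pvLoopA lines blocks i = pvListA (lines.drop i) blocks := by
  fun_induction pvLoopA lines blocks i with
  | case1 blocks i hlt line hguard ih =>
    have hline : line = lines[i] := by
      rw [show line = lines.getD i "" from rfl]
      simp [List.getD_eq_getElem?_getD, List.getElem?_eq_getElem hlt]
    have hh : pvIsHdr lines[i] = false := by
      rw [← hline]; simpa using hguard
    rw [ih, List.drop_eq_getElem_cons hlt, pvListA, hh]
    simp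
  | case2 blocks i hlt line hguard n bt ih =>
    have hline : line = lines[i] := by
      rw [show line = lines.getD i "" from rfl]
      simp [List.getD_eq_getElem?_getD, List.getElem?_eq_getElem hlt]
    have hh : pvIsHdr lines[i] = true := by
      rw [← hline]; simpa using hguard
    have hn : n = (i + 1) + ((lines.drop (i+1)).takeWhile (fun x => !pvIsHdr x)).length := by
      rw [show n = pvScanNext lines (i + 1) from rfl, pvScanNext_eq]
    have hslice : PySem.List.slice lines (some (i : Int)) (some (n : Int)) =
        lines[i] :: (lines.drop (i+1)).takeWhile (fun x => !pvIsHdr x) := by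
      have h1 : ((n : Nat) : Int) =
          (i : Int) + ((((lines.drop (i+1)).takeWhile (fun x => !pvIsHdr x)).length + 1 : Nat) : Int) := by
        rw [hn]; push_cast; omega
      rw [h1, PySem.List.slice_natCast_add]
      rw [List.drop_eq_getElem_cons hlt, List.take_succ_cons, pv_take_takeWhile]
    have hbt : bt = PySem.Str.rstrip (PySem.Str.join "\n"
        (lines[i] :: (lines.drop (i+1)).takeWhile (fun x => !pvIsHdr x))) := by
      rw [show bt = PySem.Str.rstrip (PySem.Str.join "\n"
        (PySem.List.slice lines (some (i : Int)) (some (n : Int)))) from rfl, hslice]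
    have hdrop : lines.drop n = (lines.drop (i+1)).dropWhile (fun x => !pvIsHdr x) := by
      conv_rhs => rw [← pv_drop_takeWhile (fun x => !pvIsHdr x) (lines.drop (i+1))]
      rw [List.drop_drop]
      congr 1
    rw [ih, hdrop, List.drop_eq_getElem_cons hlt, pvListA, hh]
    rw [hbt, hline]
    simp
  | case3 blocks i hge =>
    rw [List.drop_eq_nil_of_le (by omega), pvListA]
theorem pvFoldB_some (ls : List String) :
    ∀ (d : PySem.Dict String String) (h : String) (buf : List String),
    pvFlush (ls.foldl pvStepB (d, some h, buf)) =
      pvListA (ls.dropWhile (fun x => !pvIsHdr x))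
        (d.insert h (PySem.Str.rstrip (PySem.Str.join "\n"
          (buf ++ ls.takeWhile (fun x => !pvIsHdr x))))) := by
  induction ls with
  | nil => intro d h buf; simp [pvFlush, pvListA]
  | cons x xs ih =>
    intro d h buf
    by_cases hx : pvIsHdr x
    · have hstep : pvStepB (d, some h, buf) x =
          (d.insert h (PySem.Str.rstrip (PySem.Str.join "\n" buf)), some x, [x]) := by
        simp [pvStepB, pvFlush, hx]
      rw [List.foldl_cons, hstep, ih, List.dropWhile_cons, List.takeWhile_cons]
      simp only [hx, Bool.not_true, Bool.false_eq_true, reduceIte]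
      rw [pvListA, hx]
      simp
    · have hstep : pvStepB (d, some h, buf) x = (d, some h, buf ++ [x]) := by
        simp [pvStepB, hx]
      rw [List.foldl_cons, hstep, ih, List.dropWhile_cons, List.takeWhile_cons]
      simp [hx, List.append_assoc]

theorem pvFoldB_none (ls : List String) (d : PySem.Dict String String) :
    pvFlush (ls.foldl pvStepB (d, none, [])) = pvListA ls d := by
  induction ls generalizing d with
  | nil => simp [pvFlush, pvListA]
  | cons x xs ih =>
    by_cases hx : pvIsHdr x
    · have hstep : pvStepB (d, none, []) x = (d, some x, [x]) := by
        simp [pvStepB, pvFlush, hx]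
      rw [List.foldl_cons, hstep, pvFoldB_some]
      conv_rhs => rw [pvListA]
      simp [hx]
    · have hstep : pvStepB (d, none, []) x = (d, none, []) := by
        simp [pvStepB, hx]
      rw [List.foldl_cons, hstep, ih]
      conv_rhs => rw [pvListA]
      simp [hx]
-- ===== VERDICT (by name: the statement is the Claim_ definition above) =====
theorem parse_body_blocks_spec : Claim_equal_parse_body_blocks := by
  intro body _
  unfold Spec_parse_body_blocks parse_body_blocks parse_body_blocks_alt
  rw [pvLoopA_eq, List.drop_zero, pvFoldB_none]
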